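-- pv_equiv track=rewrite | github.com/yang4978/Hackerrank | Problem Solving/Algorithms/Implementation/49_the_time_in_words.py | timeInWords
-- ===== SOURCE A (Python) =====
-- def timeInWords(h, m):
--     hour = [0,'one','two','three','four','five','six','seven','eight','nine','ten','eleven','twelve']
--     minute = [' o\' clock','one minute','two','three','four','five','six','seven','eight','nine','ten','eleven','twelve','thirteen','fourteen','fifteen','sixteen','seventeen','eighteen','nineteen','twenty']
--     minute += [minute[20]+' '+minute[i] for i in range(1,10)]
--     minute =minute[0:2]+[minute[i]+' minutes' for i in range(2,30)]
--     minute[15] = 'quarter'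
--     minute.append('half')
--     minute = minute[0:1]+[minute[i]+' past ' for i in range(1,31)]+[minute[30-i]+' to ' for i in range(1,30)]
--     if(0<int(m)<=30):
--         return minute[int(m)]+hour[int(h)]
--     elif(int(m)>30):
--         return minute[int(m)]+hour[int(h)+1]
--     else:
--         return hour[int(h)]+minute[0]
-- ===== SOURCE B (Python) =====
-- def timeInWords(h, m):
--     base = ['zero', 'one', 'two', 'three', 'four', 'five', 'six', 'seven',
--             'eight', 'nine', 'ten', 'eleven', 'twelve', 'thirteen', 'fourteen',
--             'fifteen', 'sixteen', 'seventeen', 'eighteen', 'nineteen', 'twenty']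
--
--     def words(n):
--         return base[n] if n <= 20 else 'twenty ' + base[n - 20]
--
--     def phrase(n):
--         if n == 1:
--             return 'one minute'
--         if n == 15:
--             return 'quarter'
--         if n == 30:
--             return 'half'
--         return words(n) + ' minutes'
--
--     if m == 0:
--         return words(h) + " o' clock"
--     if m <= 30:
--         return phrase(m) + ' past ' + words(h)
--     return phrase(60 - m) + ' to ' + words(h + 1)
-- ===== Notes on version B (the rewrite author's own statement) =====
-- stated objective: simpler
-- what changed: B replaces A's precomputed 60-entry phrase table (built by four list comprehensions and slicing) with a direct number-to-words helper and a three-way branch on the minute (o' clock / past / to), fixing A's malformed entry for 21.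
-- intended difference: For m = 21 and m = 39 A returns 'twenty one minute minutes' (its table entry for 21 was concatenated from 'one minute' instead of 'one'); B returns the intended 'twenty one minutes'. — e.g. on timeInWords(5, 21): A returns "twenty one minute minutes past five", B returns "twenty one minutes past five"
-- outside the precondition, e.g. on timeInWords(-1, 0): A returns "twelve o' clock", B returns "twenty o' clock"; on timeInWords(5, -3): A returns "five o' clock", B returns 'eighteen minutes past five'
import Mathlib
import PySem

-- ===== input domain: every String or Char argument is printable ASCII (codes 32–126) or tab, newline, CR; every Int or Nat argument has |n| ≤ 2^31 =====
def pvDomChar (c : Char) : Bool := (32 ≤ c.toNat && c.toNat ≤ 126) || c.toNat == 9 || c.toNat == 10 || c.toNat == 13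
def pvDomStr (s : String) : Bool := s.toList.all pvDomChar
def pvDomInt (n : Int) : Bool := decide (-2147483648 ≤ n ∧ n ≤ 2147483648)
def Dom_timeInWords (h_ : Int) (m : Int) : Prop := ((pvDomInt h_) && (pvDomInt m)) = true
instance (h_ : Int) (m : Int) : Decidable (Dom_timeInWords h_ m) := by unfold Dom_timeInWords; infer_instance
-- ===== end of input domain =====

-- B is a direct decomposition (spell the number, pick past/to) instead of A's precomputed 60-entry phrase table; B fixes A's "minute minutes" bug at m = 21 and m = 39.

-- ===== PORT A =====
-- Python's hour[0] is the int 0; any branch that concatenates it raises TypeError and is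
-- excluded by Pre_, so "" stands in at index 0 here.
def timeInWords (h_ : Int) (m : Int) : String :=
  let hour : List String := ["", "one", "two", "three", "four", "five", "six", "seven",
    "eight", "nine", "ten", "eleven", "twelve"]
  let minute : List String := [" o' clock", "one minute", "two", "three", "four", "five",
    "six", "seven", "eight", "nine", "ten", "eleven", "twelve", "thirteen", "fourteen",
    "fifteen", "sixteen", "seventeen", "eighteen", "nineteen", "twenty"]
  let minute := minute ++ (PySem.List.pyRange 1 10 1).map
    (fun i => PySem.List.pyGetD minute 20 "" ++ " " ++ PySem.List.pyGetD minute i "")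
  let minute := PySem.List.slice minute (some 0) (some 2) ++
    (PySem.List.pyRange 2 30 1).map (fun i => PySem.List.pyGetD minute i "" ++ " minutes")
  let minute := PySem.List.pySetD minute 15 "quarter"
  let minute := minute ++ ["half"]
  let minute := PySem.List.slice minute (some 0) (some 1) ++
    (PySem.List.pyRange 1 31 1).map (fun i => PySem.List.pyGetD minute i "" ++ " past ") ++
    (PySem.List.pyRange 1 30 1).map (fun i => PySem.List.pyGetD minute (30 - i) "" ++ " to ")
  if 0 < m ∧ m ≤ 30 then
    PySem.List.pyGetD minute m "" ++ PySem.List.pyGetD hour h_ ""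
  else if 30 < m then
    PySem.List.pyGetD minute m "" ++ PySem.List.pyGetD hour (h_ + 1) ""
  else
    PySem.List.pyGetD hour h_ "" ++ PySem.List.pyGetD minute 0 ""

-- ===== PORT B =====
def pvBase : List String := ["zero", "one", "two", "three", "four", "five", "six", "seven",
  "eight", "nine", "ten", "eleven", "twelve", "thirteen", "fourteen", "fifteen", "sixteen",
  "seventeen", "eighteen", "nineteen", "twenty"]

def pvWords (n : Int) : String :=
  if n ≤ 20 then PySem.List.pyGetD pvBase n ""
  else "twenty " ++ PySem.List.pyGetD pvBase (n - 20) ""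

def pvPhrase (n : Int) : String :=
  if n = 1 then "one minute"
  else if n = 15 then "quarter"
  else if n = 30 then "half"
  else pvWords n ++ " minutes"

def timeInWords_alt (h_ : Int) (m : Int) : String :=
  if m = 0 then pvWords h_ ++ " o' clock"
  else if m ≤ 30 then pvPhrase m ++ " past " ++ pvWords h_
  else pvPhrase (60 - m) ++ " to " ++ pvWords (h_ + 1)

-- ===== PRECONDITION & SPEC =====
-- Pre_ restricts to the natural clock domain 1 ≤ h ≤ 12, 0 ≤ m ≤ 59 (and h ≤ 11 when the
-- phrase names the next hour): outside it A either raises (TypeError at h = 0, IndexError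
-- at h = 12 with m > 30 or at m ≥ 60) or returns an accident of Python's negative-index
-- wraparound (e.g. h = -1, or any negative m falling into the "o' clock" branch).
def Pre_timeInWords (h_ : Int) (m : Int) : Prop :=
  1 ≤ h_ ∧ h_ ≤ 12 ∧ 0 ≤ m ∧ m ≤ 59 ∧ (30 < m → h_ ≤ 11)
instance (h_ : Int) (m : Int) : Decidable (Pre_timeInWords h_ m) := by
  unfold Pre_timeInWords; infer_instance

def pvWitness_timeInWords : Int × Int := (5, 10)

-- For m = 21 and m = 39 A returns the phrase "twenty one minute minutes" (its table entry
-- for 21 was built from the string 'one minute' instead of 'one'); B returns the intended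
-- "twenty one minutes".
def D_timeInWords (h_ : Int) (m : Int) : Prop := m = 21 ∨ m = 39
instance (h_ : Int) (m : Int) : Decidable (D_timeInWords h_ m) := by
  unfold D_timeInWords; infer_instance

def Spec_timeInWords (h_ : Int) (m : Int) (out : String) : Prop :=
  ¬ D_timeInWords h_ m → out = timeInWords_alt h_ m
instance (h_ : Int) (m : Int) (out : String) : Decidable (Spec_timeInWords h_ m out) := by
  unfold Spec_timeInWords; infer_instance

def pvDiffWitness_timeInWords : Int × Int := (5, 21)
def pvDiffWitnessOut_timeInWords : String × String :=
  ("twenty one minute minutes past five", "twenty one minutes past five")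

-- ===== CLAIM (what is proved, stated in full; the proofs are below) =====
def Claim_unchanged_timeInWords : Prop := ∀ (h_ : Int) (m : Int), Dom_timeInWords h_ m → Pre_timeInWords h_ m → Spec_timeInWords h_ m (timeInWords h_ m)
def Claim_changed_timeInWords : Prop := Dom_timeInWords (pvDiffWitness_timeInWords.1) (pvDiffWitness_timeInWords.2) ∧ Pre_timeInWords (pvDiffWitness_timeInWords.1) (pvDiffWitness_timeInWords.2) ∧ D_timeInWords (pvDiffWitness_timeInWords.1) (pvDiffWitness_timeInWords.2) ∧ timeInWords (pvDiffWitness_timeInWords.1) (pvDiffWitness_timeInWords.2) = pvDiffWitnessOut_timeInWords.1 ∧ timeInWords_alt (pvDiffWitness_timeInWords.1) (pvDiffWitness_timeInWords.2) = pvDiffWitnessOut_timeInWords.2 ∧ pvDiffWitnessOut_timeInWords.1 ≠ pvDiffWitnessOut_timeInWords.2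
def Claim_exact_timeInWords : Prop := ∀ (h_ : Int) (m : Int), Dom_timeInWords h_ m → Pre_timeInWords h_ m → D_timeInWords h_ m → timeInWords h_ m ≠ timeInWords_alt h_ m

-- ===== LEMMAS AND PROOFS =====
-- One finite check over the whole clock domain: agreement off {21, 39}, disagreement on it.
set_option maxRecDepth 40000 in
theorem pvKey : ∀ hn : Fin 12, ∀ mn : Fin 60,
    (30 < mn.val → hn.val < 11) →
    ((mn.val ≠ 21 ∧ mn.val ≠ 39 →
        timeInWords ((hn.val : Int) + 1) (mn.val : Int) = timeInWords_alt ((hn.val : Int) + 1) (mn.val : Int)) ∧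
      (mn.val = 21 ∨ mn.val = 39 →
        timeInWords ((hn.val : Int) + 1) (mn.val : Int) ≠ timeInWords_alt ((hn.val : Int) + 1) (mn.val : Int))) := by
  decide

-- ===== VERDICT (by name: the statement is the Claim_ definition above) =====
theorem timeInWords_spec : Claim_unchanged_timeInWords := by
  intro h_ m _ hpre hnd
  obtain ⟨h1, h2, h3, h4, h5⟩ := hpre
  have hh : h_ = ((h_ - 1).toNat : Int) + 1 := by omega
  have hm : m = (m.toNat : Int) := by omega
  have key := pvKey ⟨(h_ - 1).toNat, by omega⟩ ⟨m.toNat, by omega⟩ (by show 30 < m.toNat → (h_ - 1).toNat < 11; omega)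
  rw [hh, hm]
  exact key.1 (by show m.toNat ≠ 21 ∧ m.toNat ≠ 39; unfold D_timeInWords at hnd; omega)

theorem timeInWords_changed : Claim_changed_timeInWords := by
  unfold Claim_changed_timeInWords; decide

theorem timeInWords_tight : Claim_exact_timeInWords := by
  intro h_ m _ hpre hd
  obtain ⟨h1, h2, h3, h4, h5⟩ := hpre
  have hh : h_ = ((h_ - 1).toNat : Int) + 1 := by omega
  have hm : m = (m.toNat : Int) := by omega
  have key := pvKey ⟨(h_ - 1).toNat, by omega⟩ ⟨m.toNat, by omega⟩ (by show 30 < m.toNat → (h_ - 1).toNat < 11; omega)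
  rw [hh, hm]
  exact key.2 (by show m.toNat = 21 ∨ m.toNat = 39; unfold D_timeInWords at hd; omega)
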